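-- pv_equiv track=rewrite | github.com/pypi-data/pypi-mirror-283 | packages/AlphaDSSP/AlphaDSSP-0.5.0.tar.gz/AlphaDSSP-0.5.0/alphadssp/alphadssp.py | categorize_keys
-- ===== SOURCE A (Python) =====
-- def categorize_keys(keys):
--     unfragmented_keys = {}
--     fragmented_keys = {}
--     accessions = [key.split("-")[1] for key in keys]
--
--     # Use a dictionary to count occurrences of each accession
--     accession_count = {}
--     for accession in accessions:
--         if accession in accession_count:
--             accession_count[accession] += 1
--         else:
--             accession_count[accession] = 1
--
--     # Iterate over keys and accessions together
--     for key, accession in zip(keys, accessions):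
--         count = accession_count[accession]
--         if count == 1:
--             unfragmented_keys[accession] = key
--         else:
--             if accession not in fragmented_keys:
--                 fragmented_keys[accession] = [key]
--             else:
--                 fragmented_keys[accession].append(key)
--
--     return unfragmented_keys, fragmented_keys
-- ===== SOURCE B (Python) =====
-- def categorize_keys(keys):
--     # One grouping pass: accession -> list of keys with that accession, in order.
--     groups = {}
--     for key in keys:
--         accession = key.split("-")[1]
--         groups.setdefault(accession, []).append(key)
--     unfragmented_keys = {}
--     fragmented_keys = {}
--     for accession, group in groups.items():
--         if len(group) == 1:
--             unfragmented_keys[accession] = group[0]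
--         else:
--             fragmented_keys[accession] = group
--     return unfragmented_keys, fragmented_keys
-- ===== Notes on version B (the rewrite author's own statement) =====
-- stated objective: simpler
-- what changed: Replaces A's separate counting dict plus a guarded zip loop by a single grouping pass (accession -> list of its keys) followed by one split of the groups by group size; the count dict and the zip disappear.
import Mathlib
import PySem

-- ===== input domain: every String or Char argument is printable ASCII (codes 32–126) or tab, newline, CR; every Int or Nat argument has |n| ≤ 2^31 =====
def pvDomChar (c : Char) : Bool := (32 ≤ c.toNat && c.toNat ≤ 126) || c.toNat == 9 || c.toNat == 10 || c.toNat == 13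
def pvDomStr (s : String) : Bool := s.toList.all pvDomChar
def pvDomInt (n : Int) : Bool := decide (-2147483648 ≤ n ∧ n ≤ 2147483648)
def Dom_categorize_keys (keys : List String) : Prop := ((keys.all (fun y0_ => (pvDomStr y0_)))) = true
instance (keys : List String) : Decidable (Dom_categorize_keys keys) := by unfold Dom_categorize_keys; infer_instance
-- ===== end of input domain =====

-- B replaces A's counting dict + guarded zip loop by one grouping pass and a split of the
-- groups by size (objective: simpler).

-- shared helper: the expression key.split("-")[1], identical in both Pythons.
-- split? is some (sep "-" ≠ ""); pyGet? = none is Python's IndexError, excluded by Pre_.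
def pvAcc (key : String) : String :=
  (PySem.List.pyGet? ((PySem.Str.split? key "-").getD []) 1).getD ""

-- ===== PORT A =====
def categorize_keys (keys : List String) : (List (String × String)) × (List (String × List String)) :=
  let accessions := keys.map (fun key => pvAcc key)
  let accession_count : PySem.Dict String Int :=
    accessions.foldl
      (fun d accession =>
        if d.contains accession then d.modify accession 0 (· + 1)
        else d.insert accession 1)
      PySem.Dict.empty
  let p :=
    (keys.zip accessions).foldl
      (fun (p : PySem.Dict String String × PySem.Dict String (List String)) ka =>
        let count := accession_count.getD ka.2 0   -- KeyError impossible: ka.2 ∈ accessions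
        if count == 1 then (p.1.insert ka.2 ka.1, p.2)
        else if (p.2.contains ka.2) = false then (p.1, p.2.insert ka.2 [ka.1])
        else (p.1, p.2.modify ka.2 [] (· ++ [ka.1])))   -- fragmented_keys[accession].append(key)
      (PySem.Dict.empty, PySem.Dict.empty)
  (p.1.items, p.2.items)

-- ===== PORT B =====
def categorize_keys_alt (keys : List String) : (List (String × String)) × (List (String × List String)) :=
  let groups : PySem.Dict String (List String) :=
    keys.foldl (fun g key => g.modify (pvAcc key) [] (· ++ [key])) PySem.Dict.empty
      -- groups.setdefault(accession, []).append(key)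
  let p :=
    groups.items.foldl
      (fun (p : PySem.Dict String String × PySem.Dict String (List String)) ag =>
        if ag.2.length == 1 then (p.1.insert ag.1 ((PySem.List.pyGet? ag.2 0).getD ""), p.2)
        else (p.1, p.2.insert ag.1 ag.2))
      (PySem.Dict.empty, PySem.Dict.empty)
  (p.1.items, p.2.items)

-- ===== PRECONDITION & SPEC =====
-- Pre_ excludes exactly the keys without '-', on which A's key.split("-")[1] raises IndexError.
def Pre_categorize_keys (keys : List String) : Prop :=
  ∀ key ∈ keys, 2 ≤ ((PySem.Str.split? key "-").getD []).length
instance (keys : List String) : Decidable (Pre_categorize_keys keys) := by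
  unfold Pre_categorize_keys; infer_instance

def pvWitness_categorize_keys : List String := ["x-A", "y-B-1", "z-B"]

def Spec_categorize_keys (keys : List String) (out : (List (String × String)) × (List (String × List String))) : Prop := out = categorize_keys_alt keys
instance (keys : List String) (out : (List (String × String)) × (List (String × List String))) : Decidable (Spec_categorize_keys keys out) := by unfold Spec_categorize_keys; infer_instance

-- ===== CLAIM (what is proved, stated in full; the proofs are below) =====
def Claim_equal_categorize_keys : Prop := ∀ (keys : List String), Dom_categorize_keys keys → Pre_categorize_keys keys → Spec_categorize_keys keys (categorize_keys keys)

-- ===== LEMMAS AND PROOFS =====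

-- proof-only abbreviations
def pvGrp (keys : List String) (a : String) : List String := keys.filter (fun k => pvAcc k == a)
def pvS (keys : List String) : List String := PySem.Set.ofList (keys.map pvAcc)
def pvCnt (keys : List String) (a : String) : Int := ((keys.map pvAcc).count a : Int)

-- the step of A's second loop, abstracted over the stored count
def pvStepA (c : String → Int)
    (p : PySem.Dict String String × PySem.Dict String (List String)) (k : String) :
    PySem.Dict String String × PySem.Dict String (List String) :=
  if c (pvAcc k) == 1 then (p.1.insert (pvAcc k) k, p.2)
  else if (p.2.contains (pvAcc k)) = false then (p.1, p.2.insert (pvAcc k) [k])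
  else (p.1, p.2.modify (pvAcc k) [] (· ++ [k]))

-- the step of B's second loop
def pvStepB
    (p : PySem.Dict String String × PySem.Dict String (List String))
    (ag : String × List String) :
    PySem.Dict String String × PySem.Dict String (List String) :=
  if ag.2.length == 1 then (p.1.insert ag.1 ((PySem.List.pyGet? ag.2 0).getD ""), p.2)
  else (p.1, p.2.insert ag.1 ag.2)

lemma pvCnt_eq_length_grp (keys : List String) (a : String) :
    (pvCnt keys a == 1) = ((pvGrp keys a).length == 1) := by
  simp only [pvCnt, pvGrp, List.count, List.countP_map]
  rw [← List.countP_eq_length_filter]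
  have h : ∀ n : Nat, ((n:Int) == 1) = (n == 1) := by
    intro n; cases h : (n == 1) <;> simp_all [beq_iff_eq]
  rw [h]
  rfl

lemma pvCount_eq_counter (accs : List String) :
    accs.foldl
      (fun d accession =>
        if d.contains accession then d.modify accession 0 (· + 1)
        else d.insert accession 1)
      PySem.Dict.empty = PySem.Dict.counter accs := by
  have h : (fun (d : PySem.Dict String Int) a => if d.contains a then d.modify a 0 (· + 1) else d.insert a 1)
      = (fun (d : PySem.Dict String Int) a => d.modify a 0 (· + 1)) := by
    funext d a
    by_cases h : d.contains a = true
    · simp [h]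
    · simp only [Bool.not_eq_true] at h
      simp [h, PySem.Dict.modify, PySem.Dict.getD_of_not_contains _ _ h]
  rw [h, PySem.Dict.counter_eq_foldl]

lemma pvCount_getD (keys : List String) (a : String) :
    (keys.foldl
        (fun (d : PySem.Dict String Int) y =>
          if d.contains (pvAcc y) then d.modify (pvAcc y) 0 (· + 1)
          else d.insert (pvAcc y) 1)
        PySem.Dict.empty).getD a 0 = pvCnt keys a := by
  have h := List.foldl_map (f := pvAcc)
    (g := fun (d : PySem.Dict String Int) accession =>
      if d.contains accession then d.modify accession 0 (· + 1) else d.insert accession 1)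
    (l := keys) (init := PySem.Dict.empty)
  rw [← h, pvCount_eq_counter, PySem.Dict.getD_counter]
  rfl

lemma pvZip_self (keys : List String) :
    keys.zip (keys.map (fun key => pvAcc key)) = keys.map (fun k => (k, pvAcc k)) := by
  induction keys with
  | nil => rfl
  | cons k ks ih => simp [ih]

lemma pvA_inv (keys : List String) :
    ∀ ks : List String, (∀ a, (ks.map pvAcc).count a ≤ (keys.map pvAcc).count a) →
    ((ks.foldl (pvStepA (pvCnt keys)) (PySem.Dict.empty, PySem.Dict.empty)).1.items
        = ((pvS ks).filter (fun a => pvCnt keys a == 1)).map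
            (fun a => (a, (PySem.List.pyGet? (pvGrp ks a) 0).getD "")))
    ∧ ((ks.foldl (pvStepA (pvCnt keys)) (PySem.Dict.empty, PySem.Dict.empty)).2.items
        = ((pvS ks).filter (fun a => !(pvCnt keys a == 1))).map
            (fun a => (a, pvGrp ks a))) := by
  intro ks
  induction ks using List.reverseRecOn with
  | nil => intro _; constructor <;> simp [pvS, PySem.Set.ofList, PySem.Set.empty, PySem.Dict.empty]
  | append_singleton ks k ih =>
    intro H
    have Hks : ∀ a, (ks.map pvAcc).count a ≤ (keys.map pvAcc).count a := by
      intro a; have := H a; simp [List.count_append] at this ⊢; omega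
    obtain ⟨ih1, ih2⟩ := ih Hks
    set c := pvCnt keys with hc
    set st := ks.foldl (pvStepA c) (PySem.Dict.empty, PySem.Dict.empty) with hst
    have hfold : (ks ++ [k]).foldl (pvStepA c) (PySem.Dict.empty, PySem.Dict.empty)
        = pvStepA c st k := by rw [List.foldl_append]; rfl
    have hSapp : pvS (ks ++ [k]) = PySem.Set.add (pvS ks) (pvAcc k) := by
      simp [pvS, PySem.Set.ofList, List.foldl_append]
    have hmemS : pvAcc k ∈ pvS ks ↔ pvAcc k ∈ ks.map pvAcc := PySem.Set.mem_ofList _ _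
    have hndS : (pvS ks).Nodup := PySem.Set.nodup_ofList _
    have hgrp : ∀ a, pvGrp (ks ++ [k]) a
        = pvGrp ks a ++ List.filter (fun k' => pvAcc k' == a) [k] := by
      intro a; simp only [pvGrp, List.filter_append]
    have hgrp_ne : ∀ a, a ≠ pvAcc k → pvGrp (ks ++ [k]) a = pvGrp ks a := by
      intro a ha
      rw [hgrp a]
      simp [show (pvAcc k == a) = false by simpa using fun h => ha h.symm]
    by_cases hone : (c (pvAcc k) == 1) = true
    · -- count is 1: goes to unfragmented; pvAcc k unseen in ks
      have hcount0 : pvAcc k ∉ ks.map pvAcc := by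
        have := H (pvAcc k)
        have h1 : (keys.map pvAcc).count (pvAcc k) = 1 := by
          have := hone; rw [hc] at this; simp [pvCnt, beq_iff_eq] at this
          exact_mod_cast this
        simp [List.count_append] at this
        rw [h1] at this
        intro hmem
        have := List.count_pos_iff.mpr hmem
        omega
      have hnotS : pvAcc k ∉ pvS ks := fun h => hcount0 (hmemS.mp h)
      have hgrpnil : pvGrp ks (pvAcc k) = [] := by
        simp only [pvGrp]
        rw [List.filter_eq_nil_iff]
        intro k' hk'
        simp only [beq_iff_eq]
        exact fun e => hcount0 (e ▸ List.mem_map_of_mem hk')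
      have hucont : st.1.contains (pvAcc k) = false := by
        have hk : st.1.keys = (pvS ks).filter (fun a => c a == 1) := by
          simp [PySem.Dict.keys, ih1, List.map_map, Function.comp_def]
        have hm : pvAcc k ∉ st.1.keys := by
          rw [hk]; exact fun h => hnotS (List.mem_of_mem_filter h)
        rw [PySem.Dict.contains_eq_decide_mem_keys]
        simpa using hm
      have hstep : pvStepA c st k = (st.1.insert (pvAcc k) k, st.2) := by
        simp [pvStepA, hone]
      have hSadd : PySem.Set.add (pvS ks) (pvAcc k) = pvS ks ++ [pvAcc k] := by
        simp only [PySem.Set.add]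
        rw [if_neg (by simpa using hnotS)]
      constructor
      · rw [hfold, hstep]
        rw [PySem.Dict.items_insert_of_not_contains _ _ hucont, ih1,
          hSapp, hSadd, List.filter_append, List.map_append]
        congr 1
        · exact List.map_congr_left (fun a ha => by
            rw [hgrp_ne a (fun e => hnotS (e ▸ List.mem_of_mem_filter ha))])
        · simp [hone, hgrp, hgrpnil, PySem.List.pyGet?, PySem.List.pyIdx?]
      · rw [hfold, hstep, ih2, hSapp, hSadd, List.filter_append]
        have hnil : List.filter (fun a => !(c a == 1)) [pvAcc k] = [] := by
          simp [hone]
        rw [hnil, List.append_nil]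
        exact List.map_congr_left (fun a ha => by
          rw [hgrp_ne a (fun e => hnotS (e ▸ List.mem_of_mem_filter ha))])
    · -- count ≠ 1: goes to fragmented
      have hone' : (c (pvAcc k) == 1) = false := by simpa using hone
      have hfkeys : st.2.keys = (pvS ks).filter (fun a => !(c a == 1)) := by
        simp [PySem.Dict.keys, ih2, List.map_map, Function.comp_def]
      have hfcont : st.2.contains (pvAcc k) = true ↔ pvAcc k ∈ pvS ks := by
        rw [PySem.Dict.contains_eq_decide_mem_keys, hfkeys]
        constructor
        · intro h
          exact List.mem_of_mem_filter (of_decide_eq_true h)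
        · intro h
          exact decide_eq_true (List.mem_filter.mpr ⟨h, by simp [hone']⟩)
      by_cases hmem : pvAcc k ∈ pvS ks
      · -- already grouped: modify appends to the existing list
        have hcont : st.2.contains (pvAcc k) = true := hfcont.mpr hmem
        have hstep : pvStepA c st k = (st.1, st.2.modify (pvAcc k) [] (· ++ [k])) := by
          simp [pvStepA, hone', hcont]
        have hSadd : PySem.Set.add (pvS ks) (pvAcc k) = pvS ks := by
          simp only [PySem.Set.add]
          rw [if_pos (by simpa using hmem)]
        have hndf : st.2.keys.Nodup := by rw [hfkeys]; exact hndS.filter _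
        have hmemit : (pvAcc k, pvGrp ks (pvAcc k)) ∈ st.2.items := by
          rw [ih2]
          exact List.mem_map_of_mem (List.mem_filter.mpr ⟨hmem, by simp [hone']⟩)
        have hgetD : st.2.getD (pvAcc k) [] = pvGrp ks (pvAcc k) :=
          PySem.Dict.getD_of_mem_items _ hmemit hndf []
        constructor
        · rw [hfold, hstep, ih1, hSapp, hSadd]
          exact List.map_congr_left (fun a ha => by
            rw [hgrp_ne a (fun e => by
              have := (List.mem_filter.mp ha).2
              rw [e, hone'] at this; exact absurd this (by simp))])
        · rw [hfold, hstep]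
          have hmod : st.2.modify (pvAcc k) [] (· ++ [k])
              = st.2.insert (pvAcc k) (pvGrp ks (pvAcc k) ++ [k]) := by
            rw [PySem.Dict.modify, hgetD]
          rw [hmod, PySem.Dict.items_insert_of_contains _ _ hcont, ih2,
            hSapp, hSadd, List.map_map]
          exact List.map_congr_left (fun a ha => by
            by_cases hea : a = pvAcc k
            · subst hea; simp [hgrp]
            · simp only [Function.comp_def]
              rw [show ((a, pvGrp ks a).1 == pvAcc k) = false by
                simpa using hea]
              simp only [Bool.false_eq_true, if_false]
              rw [hgrp_ne a hea])
      · -- first key of a new fragmented accession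
        have hcont : st.2.contains (pvAcc k) = false := by
          cases h : st.2.contains (pvAcc k)
          · rfl
          · exact absurd (hfcont.mp h) hmem
        have hstep : pvStepA c st k = (st.1, st.2.insert (pvAcc k) [k]) := by
          simp [pvStepA, hone', hcont]
        have hSadd : PySem.Set.add (pvS ks) (pvAcc k) = pvS ks ++ [pvAcc k] := by
          simp only [PySem.Set.add]
          rw [if_neg (by simpa using hmem)]
        have hgrpnil : pvGrp ks (pvAcc k) = [] := by
          simp only [pvGrp]
          rw [List.filter_eq_nil_iff]
          intro k' hk'
          simp only [beq_iff_eq]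
          exact fun e => hmem (hmemS.mpr (e ▸ List.mem_map_of_mem hk'))
        constructor
        · rw [hfold, hstep, ih1, hSapp, hSadd, List.filter_append]
          simp only [List.filter_cons, List.filter_nil, hone']
          simp only [Bool.false_eq_true, if_false, List.append_nil]
          exact List.map_congr_left (fun a ha => by
            rw [hgrp_ne a (fun e => hmem (e ▸ List.mem_of_mem_filter ha))])
        · rw [hfold, hstep, PySem.Dict.items_insert_of_not_contains _ _ hcont, ih2,
            hSapp, hSadd, List.filter_append, List.map_append]
          congr 1
          · exact List.map_congr_left (fun a ha => by
              rw [hgrp_ne a (fun e => hmem (e ▸ List.mem_of_mem_filter ha))])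
          · simp [hone', hgrp, hgrpnil]

lemma pvB_loop :
    ∀ (l : List (String × List String)) (u : PySem.Dict String String)
      (f : PySem.Dict String (List String)),
      (l.map Prod.fst).Nodup →
      (∀ p ∈ l, u.contains p.1 = false) →
      (∀ p ∈ l, f.contains p.1 = false) →
      ((l.foldl pvStepB (u, f)).1.items
          = u.items ++ (l.filter (fun p => p.2.length == 1)).map
              (fun p => (p.1, (PySem.List.pyGet? p.2 0).getD "")))
      ∧ ((l.foldl pvStepB (u, f)).2.items
          = f.items ++ l.filter (fun p => !(p.2.length == 1))) := by
  intro l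
  induction l with
  | nil => intro u f _ _ _; simp
  | cons p rest ih =>
    intro u f hnd hu hf
    have hp1u : u.contains p.1 = false := hu p (by simp)
    have hp1f : f.contains p.1 = false := hf p (by simp)
    have hndr : (rest.map Prod.fst).Nodup := by simp at hnd; exact hnd.2
    have hne : ∀ q ∈ rest, q.1 ≠ p.1 := by
      simp only [List.map_cons, List.nodup_cons, List.mem_map] at hnd
      intro q hq h
      exact hnd.1 ⟨q, hq, h⟩
    by_cases hlen : (p.2.length == 1) = true
    · have hstep : pvStepB (u, f) p = (u.insert p.1 ((PySem.List.pyGet? p.2 0).getD ""), f) := by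
        simp [pvStepB, hlen]
      have hu' : ∀ q ∈ rest, (u.insert p.1 ((PySem.List.pyGet? p.2 0).getD "")).contains q.1 = false := by
        intro q hq
        rw [PySem.Dict.contains_insert]
        simp [hne q hq, hu q (by simp [hq])]
      obtain ⟨ih1, ih2⟩ := ih _ _ hndr hu' (fun q hq => hf q (by simp [hq]))
      constructor
      · rw [List.foldl_cons, hstep, ih1,
          PySem.Dict.items_insert_of_not_contains _ _ hp1u]
        simp [hlen]
      · rw [List.foldl_cons, hstep, ih2]
        simp [hlen]
    · have hstep : pvStepB (u, f) p = (u, f.insert p.1 p.2) := by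
        simp [pvStepB, hlen]
      have hf' : ∀ q ∈ rest, (f.insert p.1 p.2).contains q.1 = false := by
        intro q hq
        rw [PySem.Dict.contains_insert]
        simp [hne q hq, hf q (by simp [hq])]
      obtain ⟨ih1, ih2⟩ := ih _ _ hndr (fun q hq => hu q (by simp [hq])) hf'
      constructor
      · rw [List.foldl_cons, hstep, ih1]
        simp [hlen]
      · rw [List.foldl_cons, hstep, ih2,
          PySem.Dict.items_insert_of_not_contains _ _ hp1f]
        simp [hlen]

lemma pvGroups_items (keys : List String) :
    (keys.foldl (fun g key => g.modify (pvAcc key) [] (· ++ [key])) PySem.Dict.empty).items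
      = (pvS keys).map (fun a => (a, pvGrp keys a)) := by
  set G := keys.foldl (fun g key => g.modify (pvAcc key) [] (· ++ [key])) PySem.Dict.empty with hG
  have hkeys : G.keys = pvS keys := by
    rw [hG, PySem.Dict.keys_foldl_modify_key keys pvAcc [] (fun _ k l => l ++ [k])]
    simp [pvS, PySem.Set.ofList, PySem.Set.update]
  have hnd : G.keys.Nodup := by
    rw [hG]
    exact PySem.Dict.nodup_keys_foldl_modify_key keys pvAcc [] (fun _ k l => l ++ [k]) _ (by simp)
  have hgetD : ∀ a, G.getD a [] = pvGrp keys a := by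
    intro a
    have : G = (keys.map (fun k => (pvAcc k, k))).foldl
        (fun d p => d.modify p.1 [] (· ++ [p.2])) PySem.Dict.empty := by
      rw [hG, List.foldl_map]
    rw [this, PySem.Dict.getD_foldl_modify_append]
    simp [pvGrp, List.filter_map, Function.comp_def, List.map_map]
  rw [PySem.Dict.items_eq_map_keys G hnd [], hkeys]
  exact List.map_congr_left (fun a _ => by rw [hgetD a])

lemma pvA_closed (keys : List String) :
    categorize_keys keys
      = (((pvS keys).filter (fun a => pvCnt keys a == 1)).map
            (fun a => (a, (PySem.List.pyGet? (pvGrp keys a) 0).getD "")),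
         ((pvS keys).filter (fun a => !(pvCnt keys a == 1))).map
            (fun a => (a, pvGrp keys a))) := by
  obtain ⟨h1, h2⟩ := pvA_inv keys keys (fun a => le_refl _)
  unfold categorize_keys
  simp only [pvZip_self, List.foldl_map, pvCount_getD]
  exact Prod.ext h1 h2

lemma pvB_closed (keys : List String) :
    categorize_keys_alt keys
      = (((pvS keys).filter (fun a => (pvGrp keys a).length == 1)).map
            (fun a => (a, (PySem.List.pyGet? (pvGrp keys a) 0).getD "")),
         ((pvS keys).filter (fun a => !((pvGrp keys a).length == 1))).map
            (fun a => (a, pvGrp keys a))) := by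
  have hnd : (((pvS keys).map (fun a => (a, pvGrp keys a))).map Prod.fst).Nodup := by
    have hid : ((pvS keys).map (fun a => (a, pvGrp keys a))).map Prod.fst = pvS keys := by
      simp [List.map_map, Function.comp_def]
    rw [hid]
    exact PySem.Set.nodup_ofList (keys.map pvAcc)
  obtain ⟨h1, h2⟩ := pvB_loop ((pvS keys).map (fun a => (a, pvGrp keys a)))
    PySem.Dict.empty PySem.Dict.empty hnd
    (fun p _ => PySem.Dict.contains_empty p.1) (fun p _ => PySem.Dict.contains_empty p.1)
  have h1' : (List.foldl pvStepB (PySem.Dict.empty, PySem.Dict.empty)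
        ((pvS keys).map (fun a => (a, pvGrp keys a)))).1.items
      = ((pvS keys).filter (fun a => (pvGrp keys a).length == 1)).map
          (fun a => (a, (PySem.List.pyGet? (pvGrp keys a) 0).getD "")) := by
    rw [h1, List.filter_map, List.map_map]
    simp [Function.comp_def, PySem.Dict.empty]
  have h2' : (List.foldl pvStepB (PySem.Dict.empty, PySem.Dict.empty)
        ((pvS keys).map (fun a => (a, pvGrp keys a)))).2.items
      = ((pvS keys).filter (fun a => !((pvGrp keys a).length == 1))).map
          (fun a => (a, pvGrp keys a)) := by
    rw [h2, List.filter_map]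
    simp [Function.comp_def, PySem.Dict.empty]
  unfold categorize_keys_alt
  simp only [pvGroups_items]
  exact Prod.ext h1' h2'

-- ===== VERDICT (by name: the statement is the Claim_ definition above) =====
theorem categorize_keys_spec : Claim_equal_categorize_keys := by
  intro keys _ _
  unfold Spec_categorize_keys
  rw [pvA_closed, pvB_closed]
  simp only [pvCnt_eq_length_grp]
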